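-- pv_equiv track=rewrite | github.com/fidemin/algorithm-problem-solving | 1118B/solution.py | make_to_right
-- ===== SOURCE A (Python) =====
-- def make_to_right(n, arr):
--     flag = True
--     ret = [-1]*n
--
--     flag_sum = 0
--     not_flag_sum = 0
--     for i in range(n):
--         if flag:
--             flag_sum += arr[i]
--             ret[i] = flag_sum
--             flag = False
--         else:
--             not_flag_sum += arr[i]
--             ret[i] = not_flag_sum
--             flag=True
--
--     return ret
-- ===== SOURCE B (Python) =====
-- def make_to_right(n, arr):
--     # Two separate running-sum streams (even indices, odd indices), then interleave.
--     evens = []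
--     s = 0
--     for i in range(0, n, 2):
--         s += arr[i]
--         evens.append(s)
--     odds = []
--     s = 0
--     for i in range(1, n, 2):
--         s += arr[i]
--         odds.append(s)
--     ret = []
--     for i in range(n):
--         ret.append(evens[i // 2] if i % 2 == 0 else odds[i // 2])
--     return ret
-- ===== Notes on version B (the rewrite author's own statement) =====
-- stated objective: alternative
-- what changed: A's single loop with a parity flag toggling between two accumulators is replaced by two independent cumulative-sum streams over the even and the odd indices, built first and then interleaved into the result by index parity.
import Mathlib
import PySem

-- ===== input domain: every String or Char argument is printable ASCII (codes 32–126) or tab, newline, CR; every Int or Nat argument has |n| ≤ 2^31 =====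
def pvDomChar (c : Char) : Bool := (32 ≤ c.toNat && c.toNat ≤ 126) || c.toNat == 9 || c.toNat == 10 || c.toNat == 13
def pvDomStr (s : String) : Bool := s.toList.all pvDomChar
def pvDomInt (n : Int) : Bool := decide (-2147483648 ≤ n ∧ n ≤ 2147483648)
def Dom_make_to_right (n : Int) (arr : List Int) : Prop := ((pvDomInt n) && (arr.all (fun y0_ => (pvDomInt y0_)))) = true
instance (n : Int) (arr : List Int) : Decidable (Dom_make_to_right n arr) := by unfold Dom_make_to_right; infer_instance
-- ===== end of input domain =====

-- B replaces A's flag-toggling single loop by two independent running-sum streams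
-- (even and odd indices) that are then interleaved; objective: alternative decomposition.


-- ===== PORT A =====
-- loop body of A: state (flag, flag_sum, not_flag_sum, ret)
def stepA (arr : List Int) (st : Bool × Int × Int × List Int) (i : Int) :
    Bool × Int × Int × List Int :=
  match st with
  | (flag, fs, nfs, ret) =>
    if flag then
      (false, fs + PySem.List.pyGetD arr i 0, nfs,
        PySem.List.pySetD ret i (fs + PySem.List.pyGetD arr i 0))
    else
      (true, fs, nfs + PySem.List.pyGetD arr i 0,
        PySem.List.pySetD ret i (nfs + PySem.List.pyGetD arr i 0))

-- arr[i] is PySem.List.pyGetD (in range under Pre_); ret[i] = v is pySetD (always in range: i < n = len ret)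
def make_to_right (n : Int) (arr : List Int) : List Int :=
  ((PySem.List.pyRange 0 n 1).foldl (stepA arr)
    (true, 0, 0, List.replicate n.toNat (-1))).2.2.2

-- ===== PORT B =====
-- loop body of B's accumulation loops: state (s, stream); appends the running sum
def accStep (arr : List Int) (st : Int × List Int) (i : Int) : Int × List Int :=
  (st.1 + PySem.List.pyGetD arr i 0, st.2 ++ [st.1 + PySem.List.pyGetD arr i 0])

def make_to_right_alt (n : Int) (arr : List Int) : List Int :=
  let evens := ((PySem.List.pyRange 0 n 2).foldl (accStep arr) (0, [])).2
  let odds := ((PySem.List.pyRange 1 n 2).foldl (accStep arr) (0, [])).2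
  (PySem.List.pyRange 0 n 1).foldl
    (fun ret i => ret ++
      [if PySem.Int.mod i 2 = 0
        then PySem.List.pyGetD evens (PySem.Int.floordiv i 2) 0
        else PySem.List.pyGetD odds (PySem.Int.floordiv i 2) 0]) []

-- ===== PRECONDITION & SPEC =====
-- Pre_ excludes exactly the inputs where Python's A raises IndexError: n > len(arr).
def Pre_make_to_right (n : Int) (arr : List Int) : Prop := n ≤ (arr.length : Int)
instance (n : Int) (arr : List Int) : Decidable (Pre_make_to_right n arr) := by
  unfold Pre_make_to_right; infer_instance

def pvWitness_make_to_right : Int × List Int := (4, [3, -1, 2, 5])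

def Spec_make_to_right (n : Int) (arr : List Int) (out : List Int) : Prop := out = make_to_right_alt n arr
instance (n : Int) (arr : List Int) (out : List Int) : Decidable (Spec_make_to_right n arr out) := by unfold Spec_make_to_right; infer_instance

-- ===== CLAIM (what is proved, stated in full; the proofs are below) =====
def Claim_equal_make_to_right : Prop := ∀ (n : Int) (arr : List Int), Dom_make_to_right n arr → Pre_make_to_right n arr → Spec_make_to_right n arr (make_to_right n arr)

-- ===== LEMMAS AND PROOFS =====

-- sum of arr[j] for even j < k  (resp. odd j < k); the common reference value
def esum (arr : List Int) : Nat → Int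
  | 0 => 0
  | k+1 => esum arr k + (if k % 2 = 0 then arr.getD k 0 else 0)

def osum (arr : List Int) : Nat → Int
  | 0 => 0
  | k+1 => osum arr k + (if k % 2 = 1 then arr.getD k 0 else 0)

-- the value A and B both store at index j
def specf (arr : List Int) (j : Nat) : Int :=
  if j % 2 = 0 then esum arr (j+1) else osum arr (j+1)

-- invariant of A's loop after the first k iterations
lemma A_inv (arr : List Int) (m k : Nat) (hk : k ≤ m) :
    (PySem.List.pyRange 0 (k : Int) 1).foldl (stepA arr)
      (true, 0, 0, List.replicate m (-1))
    = (decide (k % 2 = 0), esum arr k, osum arr k,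
       (List.range k).map (specf arr) ++ List.replicate (m - k) (-1)) := by
  induction k with
  | zero => simp [PySem.List.pyRange_one_eq_nil, esum, osum]
  | succ k ih =>
    have hk' : k ≤ m := by omega
    rw [show ((k + 1 : Nat) : Int) = (k : Int) + 1 by push_cast; ring,
      PySem.List.pyRange_one_succ_right (by positivity),
      List.foldl_append, ih hk']
    have hrep : List.replicate (m - k) (-1 : Int) = -1 :: List.replicate (m - (k+1)) (-1) := by
      rw [show m - k = (m - (k+1)) + 1 by omega]; simp [List.replicate_succ]
    have hset : ∀ v : Int,
        ((List.range k).map (specf arr) ++ List.replicate (m - k) (-1)).set k v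
        = (List.range k).map (specf arr) ++ v :: List.replicate (m - (k+1)) (-1) := by
      intro v
      rw [hrep, List.set_append_right _ _ (by simp)]
      simp
    simp only [List.foldl_cons, List.foldl_nil]
    rcases Nat.even_or_odd k with he | ho
    · have h2 : k % 2 = 0 := Nat.even_iff.mp he
      have h3 : (k + 1) % 2 = 1 := by omega
      simp only [stepA, h2, decide_true, if_pos, PySem.List.pyGetD_natCast,
        PySem.List.pySetD_natCast, hset, Prod.mk.injEq]
      refine ⟨by simp [h3], by simp [esum, h2], by simp [osum, h2], ?_⟩
      rw [List.range_succ, List.map_append]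
      simp [specf, h2, esum]
    · have h2 : k % 2 = 1 := Nat.odd_iff.mp ho
      have h3 : (k + 1) % 2 = 0 := by omega
      simp only [stepA, h2, decide_false, PySem.List.pyGetD_natCast,
        PySem.List.pySetD_natCast, hset, Prod.mk.injEq, Bool.false_eq_true,
        if_false, one_ne_zero]
      refine ⟨by simp [h3], by simp [esum, h2], by simp [osum, h2], ?_⟩
      rw [List.range_succ, List.map_append]
      simp [specf, h2, osum]

-- A's result is the reference list
lemma A_eq (arr : List Int) (m : Nat) :
    make_to_right (m : Int) arr = (List.range m).map (specf arr) := by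
  unfold make_to_right
  rw [Int.toNat_natCast, A_inv arr m m le_rfl]
  simp

-- invariant of B's even-stream loop
lemma evens_inv (arr : List Int) (t : Nat) :
    (((List.range t).map (fun k : Nat => (0 : Int) + 2 * (k : Int))).foldl
      (accStep arr) (0, []))
    = (esum arr (2 * t), (List.range t).map (fun j => esum arr (2 * j + 1))) := by
  induction t with
  | zero => simp [esum]
  | succ t ih =>
    rw [List.range_succ, List.map_append, List.foldl_append, ih]
    have hcast : (0 : Int) + 2 * (t : Int) = ((2 * t : Nat) : Int) := by push_cast; ring
    have hcast2 : (2 : Int) * (t : Int) = ((2 * t : Nat) : Int) := by push_cast; ring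
    have h1 : esum arr (2 * t) + arr.getD (2 * t) 0 = esum arr (2 * t + 1) := by
      simp [esum, Nat.mul_mod_right]
    have h2 : esum arr (2 * t + 1) = esum arr (2 * (t + 1)) := by
      rw [show 2 * (t + 1) = (2 * t + 1) + 1 by ring]
      simp [esum, Nat.mul_mod_right]
    simp only [List.map_cons, List.map_nil, List.foldl_cons, List.foldl_nil, accStep, zero_add, hcast2,
      PySem.List.pyGetD_natCast, h1, h2, List.map_append]

-- invariant of B's odd-stream loop
lemma odds_inv (arr : List Int) (t : Nat) :
    (((List.range t).map (fun k : Nat => (1 : Int) + 2 * (k : Int))).foldl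
      (accStep arr) (0, []))
    = (osum arr (2 * t + 1), (List.range t).map (fun j => osum arr (2 * j + 2))) := by
  induction t with
  | zero => simp [osum]
  | succ t ih =>
    rw [List.range_succ, List.map_append, List.foldl_append, ih]
    have hcast : (1 : Int) + 2 * (t : Int) = ((2 * t + 1 : Nat) : Int) := by push_cast; ring
    have h1 : osum arr (2 * t + 1) + arr.getD (2 * t + 1) 0 = osum arr (2 * t + 2) := by
      have : (2 * t + 1) % 2 = 1 := by omega
      simp [osum, this]
    have h2 : osum arr (2 * t + 2) = osum arr (2 * (t + 1) + 1) := by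
      have : (2 * t + 2) % 2 = 0 := by omega
      rw [show 2 * (t + 1) + 1 = (2 * t + 2) + 1 by ring]
      simp [osum, this]
    simp only [List.map_cons, List.map_nil, List.foldl_cons, List.foldl_nil, accStep, hcast,
      PySem.List.pyGetD_natCast, h1, h2, List.map_append]

-- B's result is the reference list
lemma B_eq (arr : List Int) (m : Nat) :
    make_to_right_alt (m : Int) arr = (List.range m).map (specf arr) := by
  unfold make_to_right_alt
  have hte : (if (0 : Int) < (m : Int) then (((m : Int) - 0 + 2 - 1) / 2).toNat else 0)
      = (m + 1) / 2 := by split_ifs with h <;> omega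
  have hto : (if (1 : Int) < (m : Int) then (((m : Int) - 1 + 2 - 1) / 2).toNat else 0)
      = m / 2 := by split_ifs with h <;> omega
  rw [PySem.List.pyRange_of_pos 0 (m : Int) (by norm_num),
    PySem.List.pyRange_of_pos 1 (m : Int) (by norm_num), hte, hto,
    evens_inv, odds_inv, PySem.List.foldl_append_singleton_eq_map,
    PySem.List.pyRange_zero_natCast, List.map_map, List.nil_append]
  apply List.map_congr_left
  intro j hj
  have hjm : j < m := List.mem_range.mp hj
  have hmod : PySem.Int.mod (j : Int) 2 = ((j % 2 : Nat) : Int) := by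
    exact_mod_cast PySem.Int.mod_natCast j 2
  have hdiv : PySem.Int.floordiv (j : Int) 2 = ((j / 2 : Nat) : Int) := by
    exact_mod_cast PySem.Int.floordiv_natCast j 2
  simp only [Function.comp_apply, hmod, hdiv, PySem.List.pyGetD_natCast, specf,
    Nat.cast_eq_zero]
  rcases Nat.even_or_odd j with he | ho
  · have h2 : j % 2 = 0 := Nat.even_iff.mp he
    rw [if_pos h2, if_pos h2, PySem.List.getD_map_range _ _ _ _ (by omega)]
    congr 1
    omega
  · have h2 : j % 2 = 1 := Nat.odd_iff.mp ho
    rw [if_neg (by omega), if_neg (by omega),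
      PySem.List.getD_map_range _ _ _ _ (by omega)]
    congr 1
    omega

-- ===== VERDICT (by name: the statement is the Claim_ definition above) =====
theorem make_to_right_spec : Claim_equal_make_to_right := by
  intro n arr _ _
  unfold Spec_make_to_right
  by_cases hn : n ≤ 0
  · have hA : make_to_right n arr = [] := by
      unfold make_to_right
      rw [PySem.List.pyRange_one_eq_nil hn]
      simp [Int.toNat_of_nonpos hn]
    have hB : make_to_right_alt n arr = [] := by
      unfold make_to_right_alt
      rw [PySem.List.pyRange_one_eq_nil hn]
      simp
    rw [hA, hB]
  · obtain ⟨m, rfl⟩ : ∃ m : Nat, n = (m : Int) :=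
      ⟨n.toNat, (Int.toNat_of_nonneg (by omega)).symm⟩
    rw [A_eq, B_eq]
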